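-- pv_equiv track=rewrite | github.com/achieve0410/Algorithm | 17840.py | solution
-- ===== SOURCE A (Python) =====
-- def solution(num, M):
--     answer = []
--     max_num = max(num)
--
--     a, b = 0, 1
--     for i in range(max_num):
--         a, b = b, (a+b)%M
--         if((i+1) in num):
--             answer.append(a)
--
--     return answer
-- ===== SOURCE B (Python) =====
-- def _fib_pair(n, M):
--     # fast doubling: returns (F(n) % M, F(n+1) % M)
--     if n == 0:
--         return (0 % M, 1 % M)
--     a, b = _fib_pair(n >> 1, M)
--     c = (a * ((2 * b - a) % M)) % M
--     d = (a * a + b * b) % M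
--     if n & 1:
--         return (d, (c + d) % M)
--     return (c, d)
--
-- def solution(num, M):
--     idxs = sorted({x for x in num if x >= 1})
--     return [_fib_pair(i, M)[0] for i in idxs]
-- ===== Notes on version B (the rewrite author's own statement) =====
-- stated objective: faster
-- what changed: Replaces the O(max(num))-step iterative Fibonacci loop with a scan of num's membership at every index by fast-doubling Fibonacci mod M computed once per distinct positive index, sorted ascending.
-- intended difference: When 1 is in num and M = 1 or M < 0, A appends the unreduced value 1 for index 1 (its accumulator starts at 1 before any % M), while B returns fib(1) % M (0 for M=1, 1+M for M<0), the correctly reduced residue. — e.g. on solution([1], 1): A returns [1], B returns [0]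
import Mathlib
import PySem

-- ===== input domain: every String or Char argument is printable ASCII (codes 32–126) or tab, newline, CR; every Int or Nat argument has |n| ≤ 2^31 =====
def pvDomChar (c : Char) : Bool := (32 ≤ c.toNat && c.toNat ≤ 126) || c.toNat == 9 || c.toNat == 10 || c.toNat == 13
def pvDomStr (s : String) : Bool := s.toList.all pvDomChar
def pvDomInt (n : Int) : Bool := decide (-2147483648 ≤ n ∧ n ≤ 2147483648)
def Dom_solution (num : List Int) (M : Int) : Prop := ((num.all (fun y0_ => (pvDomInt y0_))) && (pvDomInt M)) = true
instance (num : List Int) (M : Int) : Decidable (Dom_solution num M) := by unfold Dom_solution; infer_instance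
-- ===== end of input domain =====

-- B replaces A's iterate-to-max(num) Fibonacci loop by fast-doubling Fibonacci mod M per distinct positive index (sorted ascending); measured faster.

-- ===== PORT A =====
-- the loop body of A's for-loop: state (a, b, answer)
def stepA (num : List Int) (M : Int) (s : Int × Int × List Int) (i : Int) : Int × Int × List Int :=
  (s.2.1, PySem.Int.mod (s.1 + s.2.1) M,
   if num.contains (i + 1) then s.2.2 ++ [s.2.1] else s.2.2)

def solution (num : List Int) (M : Int) : List Int :=
  match PySem.List.max? num (fun x => x) with
  | none => []   -- max([]) raises ValueError in Python; excluded by Pre_solution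
  | some maxNum =>
      ((PySem.List.pyRange 0 maxNum 1).foldl (stepA num M) (0, 1, [])).2.2

-- ===== PORT B =====
-- _fib_pair(n, M): fast doubling, returns (F(n) % M, F(n+1) % M).  The Python recurses on
-- n >> 1 (n is a nonnegative int here); we recurse on the Nat value with a structural fuel
-- counter (fuel > n always holds at every call) — exact for all nonnegative n.
def fibPairAux (M : Int) : Nat → Nat → Int × Int
  | 0, _ => (0, 0)           -- unreachable: fuel > n is maintained
  | _ + 1, 0 => (PySem.Int.mod 0 M, PySem.Int.mod 1 M)
  | fuel + 1, n + 1 =>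
      let p := fibPairAux M fuel ((n + 1) / 2)
      let c := PySem.Int.mod (p.1 * PySem.Int.mod (2 * p.2 - p.1) M) M
      let d := PySem.Int.mod (p.1 * p.1 + p.2 * p.2) M
      if (n + 1) % 2 = 1 then (d, PySem.Int.mod (c + d) M) else (c, d)

def fibPairAlt (M : Int) (n : Nat) : Int × Int := fibPairAux M (n + 1) n

def solution_alt (num : List Int) (M : Int) : List Int :=
  let idxs := PySem.List.sorted (PySem.Set.ofList (num.filter (fun x => 1 ≤ x))) (fun x => x) false
  idxs.map (fun i => (fibPairAlt M i.toNat).1)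

-- ===== PRECONDITION & SPEC =====
-- Pre_ excludes exactly the inputs where A raises: empty num (ValueError from max([])),
-- and M = 0 when num has a positive element (ZeroDivisionError from % 0 inside the loop).
def Pre_solution (num : List Int) (M : Int) : Prop :=
  num ≠ [] ∧ (M = 0 → ∀ x ∈ num, x ≤ 0)
instance (num : List Int) (M : Int) : Decidable (Pre_solution num M) := by
  unfold Pre_solution; infer_instance

def pvWitness_solution : List Int × Int := ([3, 1, 3, 7], 10)


-- When 1 ∈ num and M = 1 or M < 0, A appends the unreduced 1 for index 1 (its accumulator
-- starts at 1 before any % M), while B returns fib(1) % M (0 for M = 1, 1 + M for M < 0),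
-- the correctly reduced residue — the intended value for a "Fibonacci mod M" function.
def D_solution (num : List Int) (M : Int) : Prop :=
  (num.contains 1 && (M == 1 || decide (M < 0))) = true
instance (num : List Int) (M : Int) : Decidable (D_solution num M) := by
  unfold D_solution; infer_instance

def Spec_solution (num : List Int) (M : Int) (out : List Int) : Prop :=
  ¬ D_solution num M → out = solution_alt num M
instance (num : List Int) (M : Int) (out : List Int) : Decidable (Spec_solution num M out) := by
  unfold Spec_solution; infer_instance

def pvDiffWitness_solution : List Int × Int := ([1], 1)
def pvDiffWitnessOut_solution : (List Int) × (List Int) := ([1], [0])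

-- ===== CLAIM (what is proved, stated in full; the proofs are below) =====
def Claim_unchanged_solution : Prop := ∀ (num : List Int) (M : Int), Dom_solution num M → Pre_solution num M → Spec_solution num M (solution num M)
def Claim_changed_solution : Prop := Dom_solution (pvDiffWitness_solution.1) (pvDiffWitness_solution.2) ∧ Pre_solution (pvDiffWitness_solution.1) (pvDiffWitness_solution.2) ∧ D_solution (pvDiffWitness_solution.1) (pvDiffWitness_solution.2) ∧ solution (pvDiffWitness_solution.1) (pvDiffWitness_solution.2) = pvDiffWitnessOut_solution.1 ∧ solution_alt (pvDiffWitness_solution.1) (pvDiffWitness_solution.2) = pvDiffWitnessOut_solution.2 ∧ pvDiffWitnessOut_solution.1 ≠ pvDiffWitnessOut_solution.2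
def Claim_exact_solution : Prop := ∀ (num : List Int) (M : Int), Dom_solution num M → Pre_solution num M → D_solution num M → solution num M ≠ solution_alt num M

-- ===== LEMMAS AND PROOFS =====

-- A's Fibonacci state after n loop iterations
def fibIter (M : Int) : Nat → Int × Int
  | 0 => (0, 1)
  | n + 1 => ((fibIter M n).2, PySem.Int.mod ((fibIter M n).1 + (fibIter M n).2) M)

-- the indices 1..t that lie in num, in increasing order
def candList (num : List Int) (t : Nat) : List Int :=
  ((List.range t).map (fun i : Nat => (i : Int) + 1)).filter (fun x => num.contains x)

-- the value A appends for index n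
def pyVal (M : Int) (n : Nat) : Int :=
  if n = 1 then 1 else PySem.Int.mod ((Nat.fib n : Nat) : Int) M

lemma pm_modeq (M x : Int) : PySem.Int.mod x M ≡ x [ZMOD M] := by
  have h := PySem.Int.floordiv_mul_add_mod x M
  exact Int.modEq_iff_dvd.mpr ⟨PySem.Int.floordiv x M, by linarith⟩

lemma mod_congr {M x y : Int} (hM : M ≠ 0) (h : x ≡ y [ZMOD M]) :
    PySem.Int.mod x M = PySem.Int.mod y M := by
  have hd : M ∣ PySem.Int.mod x M - PySem.Int.mod y M :=
    ((pm_modeq M x).trans (h.trans (pm_modeq M y).symm)).symm.dvd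
  have habs : |PySem.Int.mod x M - PySem.Int.mod y M| < |M| := by
    rcases lt_or_gt_of_ne hM with hneg | hpos
    · have b1 := PySem.Int.mod_neg_bounds x hneg
      have b2 := PySem.Int.mod_neg_bounds y hneg
      rw [abs_lt, abs_of_neg hneg]; omega
    · have b1 := PySem.Int.mod_nonneg x hpos
      have b2 := PySem.Int.mod_lt x hpos
      have b3 := PySem.Int.mod_nonneg y hpos
      have b4 := PySem.Int.mod_lt y hpos
      rw [abs_lt, abs_of_pos hpos]; omega
  have hz := Int.eq_zero_of_abs_lt_dvd ((abs_dvd M _).mpr hd) habs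
  omega

lemma fib_cast_two_mul (k : Nat) :
    ((Nat.fib (2 * k) : Nat) : Int) = (Nat.fib k : Int) * (2 * (Nat.fib (k + 1) : Int) - (Nat.fib k : Int)) := by
  have hle : Nat.fib k ≤ 2 * Nat.fib (k + 1) :=
    le_trans (Nat.fib_le_fib_succ) (by omega)
  rw [Nat.fib_two_mul, Nat.cast_mul, Nat.cast_sub hle]
  push_cast
  ring

lemma fibPairAux_eq {M : Int} (hM : M ≠ 0) :
    ∀ fuel n, n < fuel →
      fibPairAux M fuel n = (PySem.Int.mod ((Nat.fib n : Nat) : Int) M,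
                             PySem.Int.mod ((Nat.fib (n + 1) : Nat) : Int) M) := by
  intro fuel
  induction fuel with
  | zero => intro n hn; omega
  | succ fuel ih =>
    intro n hn
    match n with
    | 0 => simp [fibPairAux, Nat.fib]
    | n + 1 =>
      have hlt : (n + 1) / 2 < fuel := by omega
      have hrec := ih ((n + 1) / 2) hlt
      show fibPairAux M (fuel + 1) (n + 1) = _
      rw [fibPairAux, hrec]
      set k := (n + 1) / 2 with hk
      have hc : PySem.Int.mod
          (PySem.Int.mod ((Nat.fib k : Nat) : Int) M *
            PySem.Int.mod (2 * PySem.Int.mod ((Nat.fib (k + 1) : Nat) : Int) M -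
              PySem.Int.mod ((Nat.fib k : Nat) : Int) M) M) M
          = PySem.Int.mod ((Nat.fib (2 * k) : Nat) : Int) M := by
        apply mod_congr hM
        rw [fib_cast_two_mul k]
        exact (pm_modeq M _).mul
          ((pm_modeq M _).trans ((Int.ModEq.refl 2).mul (pm_modeq M _)|>.sub (pm_modeq M _)))
      have hd : PySem.Int.mod
          (PySem.Int.mod ((Nat.fib k : Nat) : Int) M * PySem.Int.mod ((Nat.fib k : Nat) : Int) M +
           PySem.Int.mod ((Nat.fib (k + 1) : Nat) : Int) M * PySem.Int.mod ((Nat.fib (k + 1) : Nat) : Int) M) M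
          = PySem.Int.mod ((Nat.fib (2 * k + 1) : Nat) : Int) M := by
        apply mod_congr hM
        have : ((Nat.fib (2 * k + 1) : Nat) : Int)
            = (Nat.fib k : Int) * (Nat.fib k : Int) + (Nat.fib (k + 1) : Int) * (Nat.fib (k + 1) : Int) := by
          rw [Nat.fib_two_mul_add_one]; push_cast; ring
        rw [this]
        exact ((pm_modeq M _).mul (pm_modeq M _)).add ((pm_modeq M _).mul (pm_modeq M _))
      by_cases hodd : (n + 1) % 2 = 1
      · have hkk : n + 1 = 2 * k + 1 := by omega
        rw [if_pos hodd, hc, hd]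
        have hsum : PySem.Int.mod
            (PySem.Int.mod ((Nat.fib (2 * k) : Nat) : Int) M +
             PySem.Int.mod ((Nat.fib (2 * k + 1) : Nat) : Int) M) M
            = PySem.Int.mod ((Nat.fib (2 * k + 2) : Nat) : Int) M := by
          apply mod_congr hM
          have : ((Nat.fib (2 * k + 2) : Nat) : Int) = (Nat.fib (2 * k) : Int) + (Nat.fib (2 * k + 1) : Int) := by
            rw [Nat.fib_add_two]; push_cast; ring
          rw [this]
          exact (pm_modeq M _).add (pm_modeq M _)
        rw [hsum, hkk]
      · have hkk : n + 1 = 2 * k := by omega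
        rw [if_neg hodd, hc, hd, hkk]

lemma fibPairAlt_eq {M : Int} (hM : M ≠ 0) (n : Nat) :
    fibPairAlt M n = (PySem.Int.mod ((Nat.fib n : Nat) : Int) M,
                      PySem.Int.mod ((Nat.fib (n + 1) : Nat) : Int) M) :=
  fibPairAux_eq hM (n + 1) n (by omega)

lemma fibIter_eq {M : Int} (hM : M ≠ 0) :
    ∀ n, 1 ≤ n → fibIter M n = (pyVal M n, PySem.Int.mod ((Nat.fib (n + 1) : Nat) : Int) M) := by
  intro n hn
  induction n, hn using Nat.le_induction with
  | base =>
    show ((fibIter M 0).2, PySem.Int.mod ((fibIter M 0).1 + (fibIter M 0).2) M) = _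
    norm_num [fibIter, pyVal, Nat.fib_two]
  | succ n hn ih =>
    show ((fibIter M n).2, PySem.Int.mod ((fibIter M n).1 + (fibIter M n).2) M) = _
    rw [ih]
    refine Prod.ext ?_ ?_
    · show PySem.Int.mod ((Nat.fib (n + 1) : Nat) : Int) M = pyVal M (n + 1)
      rw [pyVal, if_neg (by omega)]
    · show PySem.Int.mod (pyVal M n + PySem.Int.mod ((Nat.fib (n + 1) : Nat) : Int) M) M
          = PySem.Int.mod ((Nat.fib (n + 1 + 1) : Nat) : Int) M
      apply mod_congr hM
      have hcast : ((Nat.fib (n + 1 + 1) : Nat) : Int) = (Nat.fib n : Int) + (Nat.fib (n + 1) : Int) := by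
        rw [Nat.fib_add_two]; push_cast; ring
      have hpv : pyVal M n ≡ ((Nat.fib n : Nat) : Int) [ZMOD M] := by
        by_cases h1 : n = 1
        · subst h1; rw [pyVal, if_pos rfl]; rfl
        · rw [pyVal, if_neg h1]; exact pm_modeq M _
      rw [hcast]
      exact hpv.add (pm_modeq M _)

-- A's answer list after t iterations
def ansList (num : List Int) (M : Int) (t : Nat) : List Int :=
  (candList num t).map (fun x => (fibIter M x.toNat).1)

lemma candList_succ (num : List Int) (t : Nat) :
    candList num (t + 1) = candList num t ++
      (if num.contains ((t : Int) + 1) then [(t : Int) + 1] else []) := by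
  unfold candList
  rw [List.range_succ, List.map_append, List.filter_append]
  congr 1
  simp only [List.map_cons, List.map_nil, List.filter_cons, List.filter_nil]

lemma loopA (num : List Int) (M : Int) :
    ∀ t : Nat, (PySem.List.pyRange 0 (t : Int) 1).foldl (stepA num M) (0, 1, []) =
      ((fibIter M t).1, (fibIter M t).2, ansList num M t) := by
  intro t
  induction t with
  | zero =>
    rw [PySem.List.pyRange_one_eq_nil (by omega)]
    simp [fibIter, ansList, candList]
  | succ t ih =>
    have hcast : ((t + 1 : Nat) : Int) = (t : Int) + 1 := by push_cast; ring
    rw [hcast, PySem.List.pyRange_one_succ_right (by omega), List.foldl_append, ih]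
    show stepA num M _ (t : Int) = _
    unfold stepA
    refine Prod.ext rfl (Prod.ext rfl ?_)
    show (if num.contains ((t : Int) + 1) then ansList num M t ++ [(fibIter M t).2] else ansList num M t)
        = ansList num M (t + 1)
    have hmap : List.map (fun x => (fibIter M x.toNat).1)
          (if num.contains ((t : Int) + 1) then [(t : Int) + 1] else [])
        = (if num.contains ((t : Int) + 1) then [(fibIter M t).2] else []) := by
      by_cases hc : num.contains ((t : Int) + 1)
      · rw [if_pos hc, if_pos hc]
        have htn : ((t : Int) + 1).toNat = t + 1 := by omega
        simp only [List.map_cons, List.map_nil, htn]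
        rfl
      · rw [if_neg hc, if_neg hc]; rfl
    have hstep : ansList num M (t + 1)
        = ansList num M t ++ (if num.contains ((t : Int) + 1) then [(fibIter M t).2] else []) := by
      unfold ansList
      rw [candList_succ, List.map_append, hmap]
    rw [hstep]
    by_cases hc : num.contains ((t : Int) + 1)
    · rw [if_pos hc, if_pos hc]
    · rw [if_neg hc, if_neg hc, List.append_nil]

lemma contains_iff_mem (num : List Int) (x : Int) : num.contains x = true ↔ x ∈ num := by
  simp

lemma mem_candList (num : List Int) (t : Nat) (x : Int) :
    x ∈ candList num t ↔ (1 ≤ x ∧ x ≤ (t : Int)) ∧ x ∈ num := by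
  unfold candList
  simp only [List.mem_filter, List.mem_map, List.mem_range, contains_iff_mem]
  constructor
  · rintro ⟨⟨i, hi, rfl⟩, hx⟩; exact ⟨⟨by omega, by omega⟩, hx⟩
  · rintro ⟨⟨h1, h2⟩, hx⟩
    exact ⟨⟨(x - 1).toNat, by omega, by omega⟩, hx⟩

lemma pairwise_candList (num : List Int) (t : Nat) : (candList num t).Pairwise (· < ·) := by
  unfold candList
  have hmap : (((List.range t).map (fun i : Nat => (i : Int) + 1))).Pairwise (· < ·) := by
    refine List.Pairwise.map _ (fun a b h => ?_) List.pairwise_lt_range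
    omega
  exact List.Pairwise.sublist List.filter_sublist hmap

lemma nodup_candList (num : List Int) (t : Nat) : (candList num t).Nodup :=
  (pairwise_candList num t).imp (fun h => ne_of_lt h)

-- the sorted distinct positive elements of num equal candList, when t bounds num from above
lemma idxs_eq_candList (num : List Int) (t : Nat)
    (hub : ∀ x ∈ num, x ≤ (t : Int)) :
    PySem.List.sorted (PySem.Set.ofList (num.filter (fun x => 1 ≤ x))) (fun x => x) false
      = candList num t := by
  apply PySem.List.sorted_eq_of_perm_of_pairwise_lt
  · rw [List.perm_ext_iff_of_nodup (nodup_candList num t) (PySem.Set.nodup_ofList _)]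
    intro x
    rw [mem_candList, PySem.Set.mem_ofList, List.mem_filter]
    constructor
    · rintro ⟨⟨h1, _⟩, hx⟩; exact ⟨hx, by simpa using h1⟩
    · rintro ⟨hx, h1⟩; exact ⟨⟨by simpa using h1, hub x hx⟩, hx⟩
  · exact pairwise_candList num t

-- main equivalence outside D_
lemma solution_eq_alt (num : List Int) (M : Int) (hpre : Pre_solution num M)
    (hnD : ¬ D_solution num M) : solution num M = solution_alt num M := by
  obtain ⟨hne, hzero⟩ := hpre
  rcases hmax : PySem.List.max? num (fun x => x) with _ | mx
  · exact absurd ((PySem.List.max?_eq_none_iff _ _).mp hmax) hne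
  · have hmem : mx ∈ num := PySem.List.max?_mem hmax
    have hub : ∀ y ∈ num, y ≤ mx := PySem.List.max?_isMax hmax
    by_cases hpos : mx ≤ 0
    · -- loop body empty; B's filter is empty too
      have hfil : num.filter (fun x => 1 ≤ x) = [] := by
        rw [List.filter_eq_nil_iff]
        intro x hx
        have := hub x hx
        simp only [decide_eq_true_eq]
        omega
      rw [solution, hmax]
      show ((PySem.List.pyRange 0 mx 1).foldl (stepA num M) (0, 1, [])).2.2 = solution_alt num M
      rw [PySem.List.pyRange_one_eq_nil hpos, solution_alt, hfil]
      rfl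
    · have hM : M ≠ 0 := by
        intro h0
        exact absurd (hzero h0 mx hmem) (by omega)
      have hmx1 : 1 ≤ mx := by omega
      have ht : ((mx.toNat : Nat) : Int) = mx := by omega
      set t := mx.toNat with htdef
      have hA : solution num M = ansList num M t := by
        rw [solution, hmax, ← ht]
        show ((PySem.List.pyRange 0 ((t : Nat) : Int) 1).foldl (stepA num M) (0, 1, [])).2.2
            = ansList num M t
        rw [loopA]
      have hubT : ∀ x ∈ num, x ≤ (t : Int) := by intro x hx; rw [ht]; exact hub x hx
      have hB : solution_alt num M
          = (candList num t).map (fun i => (fibPairAlt M i.toNat).1) := by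
        rw [solution_alt, idxs_eq_candList num t hubT]
      rw [hA, hB, ansList]
      apply List.map_congr_left
      intro x hx
      obtain ⟨⟨hx1, _⟩, hxmem⟩ := (mem_candList num t x).mp hx
      have hxt : 1 ≤ x.toNat := by omega
      rw [fibIter_eq hM x.toNat hxt, fibPairAlt_eq hM]
      show pyVal M x.toNat = PySem.Int.mod ((Nat.fib x.toNat : Nat) : Int) M
      by_cases h1 : x.toNat = 1
      · have hx1' : x = 1 := by omega
        have hD' : ¬ (M = 1 ∨ M < 0) := by
          intro h
          apply hnD
          have hc : num.contains (1 : Int) = true := by simpa using (hx1' ▸ hxmem)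
          simp only [D_solution, hc, Bool.true_and, Bool.or_eq_true, beq_iff_eq,
            decide_eq_true_eq]
          exact h
        have hM2 : 1 < M := by omega
        rw [pyVal, if_pos h1, h1]
        show (1 : Int) = PySem.Int.mod ((Nat.fib 1 : Nat) : Int) M
        rw [show ((Nat.fib 1 : Nat) : Int) = 1 by norm_num [Nat.fib],
            PySem.Int.mod_eq_emod_of_pos (by omega : (0 : Int) < M),
            Int.emod_eq_of_lt (by omega) (by omega)]
      · rw [pyVal, if_neg h1]

-- ===== VERDICT (by name: the statement is the Claim_ definition above) =====
theorem solution_spec : Claim_unchanged_solution := by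
  intro num M _ hpre
  unfold Spec_solution
  intro hnD
  exact solution_eq_alt num M hpre hnD

theorem solution_changed : Claim_changed_solution := by
  unfold Claim_changed_solution; decide

theorem solution_tight : Claim_exact_solution := by
  intro num M _ hpre hD
  rw [D_solution, Bool.and_eq_true, Bool.or_eq_true, beq_iff_eq, decide_eq_true_eq] at hD
  have h1mem : (1 : Int) ∈ num := by simpa using hD.1
  have hM1 := hD.2
  have hM : M ≠ 0 := by rcases hM1 with h | h <;> omega
  obtain ⟨hne, _⟩ := hpre
  rcases hmax : PySem.List.max? num (fun x => x) with _ | mx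
  · exact absurd ((PySem.List.max?_eq_none_iff _ _).mp hmax) hne
  · have hub : ∀ y ∈ num, y ≤ mx := PySem.List.max?_isMax hmax
    have hmx1 : 1 ≤ mx := hub 1 h1mem
    have ht : ((mx.toNat : Nat) : Int) = mx := by omega
    set t := mx.toNat with htdef
    have hA : solution num M = ansList num M t := by
      rw [solution, hmax, ← ht]
      show ((PySem.List.pyRange 0 ((t : Nat) : Int) 1).foldl (stepA num M) (0, 1, [])).2.2
          = ansList num M t
      rw [loopA]
    have hubT : ∀ x ∈ num, x ≤ (t : Int) := by intro x hx; rw [ht]; exact hub x hx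
    have hB : solution_alt num M
        = (candList num t).map (fun i => (fibPairAlt M i.toNat).1) := by
      rw [solution_alt, idxs_eq_candList num t hubT]
    -- candList starts with 1
    obtain ⟨s, hs⟩ : ∃ s, t = s + 1 := ⟨t - 1, by omega⟩
    have hhead : candList num t = 1 :: ((((List.range s).map (fun i : Nat => ((i : Int) + 1) + 1))).filter (fun x => num.contains x)) := by
      rw [candList, hs, List.range_succ_eq_map, List.map_cons, List.map_map]
      rw [List.filter_cons]
      rw [if_pos (by simpa using h1mem)]
      simp [Function.comp_def]
    intro heq
    rw [hA, hB, ansList, hhead] at heq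
    simp only [List.map_cons] at heq
    have hheads := (List.cons.injEq _ _ _ _).mp heq |>.1
    rw [fibPairAlt_eq hM] at hheads
    have hfi : (fibIter M (1 : Int).toNat).1 = 1 := by norm_num [fibIter]
    rw [hfi] at hheads
    have hf1 : ((Nat.fib (1 : Int).toNat : Nat) : Int) = 1 := by norm_num [Nat.fib]
    rw [hf1] at hheads
    rcases hM1 with h | h
    · subst h
      have : PySem.Int.mod 1 1 = 0 := by decide
      omega
    · have := PySem.Int.mod_neg_bounds (1 : Int) h
      omega
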